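-- pv_equiv track=rewrite | github.com/djotaku/adventofcode | 2015/Day_10/Python/part_1.py | create_number_lists
-- ===== SOURCE A (Python) =====
-- import copy
--
-- def create_number_lists(game_input):
--     number_list = []
--     temp_list = []
--     current_number = 0
--     for number in game_input:
--         if len(game_input) == 1:
--             return [[1]]
--         else:
--             if int(number) == current_number:
--                 temp_list.append(int(number))
--             else:
--                 if temp_list:
--                     list_to_insert = copy.deepcopy(temp_list)
--                     number_list.append(list_to_insert)
--                 current_number = int(number)
--                 temp_list.append(int(number))
--     number_list.append(temp_list)
--     return number_list
-- ===== SOURCE B (Python) =====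
-- def create_number_lists(game_input):
--     if len(game_input) == 1:
--         return [[1]]
--     digits = [int(x) for x in game_input]
--     cuts = [i + 1 for i, (a, b) in enumerate(zip(digits, digits[1:])) if a != b]
--     return [digits[:i] for i in cuts] + [digits]
-- ===== Notes on version B (the rewrite author's own statement) =====
-- stated objective: alternative
-- what changed: Replaced A's single interleaved loop (mutable temp_list plus deepcopy snapshots at each transition, with the single-element early return inside the loop) by a three-phase pipeline: parse all digits once, compute the cut positions with an enumerate/zip pairwise comparison, then emit the growing prefixes as slices digits[:i] plus the full list.
import Mathlib
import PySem

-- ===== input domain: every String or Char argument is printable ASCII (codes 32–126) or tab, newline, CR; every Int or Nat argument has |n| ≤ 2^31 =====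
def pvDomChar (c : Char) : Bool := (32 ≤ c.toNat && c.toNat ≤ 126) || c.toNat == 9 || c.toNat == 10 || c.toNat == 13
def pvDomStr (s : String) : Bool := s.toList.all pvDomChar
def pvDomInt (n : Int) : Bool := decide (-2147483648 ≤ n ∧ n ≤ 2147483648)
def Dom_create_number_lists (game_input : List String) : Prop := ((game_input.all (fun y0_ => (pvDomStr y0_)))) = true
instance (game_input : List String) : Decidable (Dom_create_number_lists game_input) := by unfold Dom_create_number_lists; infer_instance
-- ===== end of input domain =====

-- B replaces A's interleaved accumulate-and-deepcopy loop by a three-phase pipeline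
-- (parse once, pairwise-compare to find cut positions, slice); objective: alternative.

-- int(s); Pre_ guarantees the parse succeeds (outside Pre_ the Python raises ValueError)
def pyIntD (s : String) : Int := (PySem.Int.ofStr? s).getD 0

-- ===== PORT A =====
-- the for-loop of A, with its in-loop early return (len(game_input)==1) as Sum.inl
def createLoopA (len1 : Bool) (xs : List String) (number_list : List (List Int))
    (temp_list : List Int) (current_number : Int) :
    (List (List Int)) ⊕ (List (List Int) × List Int) :=
  match xs with
  | [] => Sum.inr (number_list, temp_list)
  | n :: rest =>
    if len1 then Sum.inl [[1]]
    else if pyIntD n == current_number then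
      createLoopA len1 rest number_list (temp_list ++ [pyIntD n]) current_number
    else
      let nl' := if temp_list.isEmpty then number_list else number_list ++ [temp_list]
      createLoopA len1 rest nl' (temp_list ++ [pyIntD n]) (pyIntD n)

def create_number_lists (game_input : List String) : List (List Int) :=
  match createLoopA (game_input.length == 1) game_input [] [] 0 with
  | Sum.inl r => r
  | Sum.inr (nl, tl) => nl ++ [tl]

-- ===== PORT B =====
def create_number_lists_alt (game_input : List String) : List (List Int) :=
  if game_input.length == 1 then [[1]]
  else
    let digits := game_input.map (fun x => pyIntD x)
    let cuts := ((PySem.List.enumerate (digits.zip (PySem.List.slice digits (some 1) none)) 0).filter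
        (fun p => p.2.1 != p.2.2)).map (fun p => p.1 + 1)
    (cuts.map (fun i => PySem.List.slice digits none (some i))) ++ [digits]

-- ===== PRECONDITION & SPEC =====
-- Pre_ excludes exactly the inputs on which Python A raises ValueError: a list of
-- length ≠ 1 containing a string int() cannot parse.
def Pre_create_number_lists (game_input : List String) : Prop :=
  game_input.length = 1 ∨ ∀ s ∈ game_input, (PySem.Int.ofStr? s).isSome = true
instance (game_input : List String) : Decidable (Pre_create_number_lists game_input) := by
  unfold Pre_create_number_lists; infer_instance

def pvWitness_create_number_lists : List String := ["1", "1", "2"]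

def Spec_create_number_lists (game_input : List String) (out : List (List Int)) : Prop := out = create_number_lists_alt game_input
instance (game_input : List String) (out : List (List Int)) : Decidable (Spec_create_number_lists game_input out) := by unfold Spec_create_number_lists; infer_instance

-- ===== CLAIM (what is proved, stated in full; the proofs are below) =====
def Claim_equal_create_number_lists : Prop := ∀ (game_input : List String), Dom_create_number_lists game_input → Pre_create_number_lists game_input → Spec_create_number_lists game_input (create_number_lists game_input)

-- ===== LEMMAS AND PROOFS =====

-- relative positions (within the remaining digit list) at which a digit differs from its predecessor
def tb (cur : Int) : List Int → List Nat
  | [] => []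
  | d :: rs => if d = cur then (tb d rs).map (· + 1) else 0 :: (tb d rs).map (· + 1)

-- A's loop, once temp_list is nonempty: it returns the growing prefixes cut at tb's positions
theorem createLoopA_char (xs : List String) : ∀ (nl : List (List Int)) (tl : List Int) (cur : Int),
    tl ≠ [] →
    createLoopA false xs nl tl cur =
      Sum.inr (nl ++ (tb cur (xs.map pyIntD)).map (fun j => tl ++ (xs.map pyIntD).take j),
               tl ++ xs.map pyIntD) := by
  induction xs with
  | nil => intro nl tl cur _; simp [createLoopA, tb]
  | cons x rest ih =>
    intro nl tl cur htl
    by_cases h : pyIntD x = cur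
    · rw [show createLoopA false (x :: rest) nl tl cur
          = createLoopA false rest nl (tl ++ [pyIntD x]) cur by simp [createLoopA, h]]
      rw [ih nl (tl ++ [pyIntD x]) cur (by simp)]
      have htb : tb cur ((x :: rest).map pyIntD) = (tb cur (rest.map pyIntD)).map (· + 1) := by
        simp [tb, h]
      rw [htb, List.map_map, List.map_cons]
      refine congrArg Sum.inr (Prod.ext ?_ (by simp))
      refine congrArg (nl ++ ·) ?_
      apply List.map_congr_left
      intro j _
      simp [List.take_succ_cons]
    · rw [show createLoopA false (x :: rest) nl tl cur
          = createLoopA false rest (nl ++ [tl]) (tl ++ [pyIntD x]) (pyIntD x) by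
        simp [createLoopA, h, htl]]
      rw [ih (nl ++ [tl]) (tl ++ [pyIntD x]) (pyIntD x) (by simp)]
      have htb : tb cur ((x :: rest).map pyIntD)
          = 0 :: (tb (pyIntD x) (rest.map pyIntD)).map (· + 1) := by
        simp [tb, h]
      rw [htb, List.map_cons, List.map_map]
      refine congrArg Sum.inr (Prod.ext ?_ (by simp))
      simp only [List.take_zero, List.append_nil, List.append_assoc, List.singleton_append]
      refine congrArg (nl ++ ·) (congrArg (tl :: ·) ?_)
      apply List.map_congr_left
      intro j _
      simp [List.take_succ_cons]

-- B's cut positions are tb's positions shifted by k + 1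
theorem cuts_char (rs : List Int) : ∀ (d0 : Int) (k : Int),
    ((PySem.List.enumerate ((d0 :: rs).zip rs) k).filter
        (fun p => p.2.1 != p.2.2)).map (fun p => p.1 + 1)
      = (tb d0 rs).map (fun j : Nat => (j : Int) + (k + 1)) := by
  induction rs with
  | nil => intro d0 k; simp [PySem.List.enumerate_nil, tb]
  | cons d1 t ih =>
    intro d0 k
    rw [List.zip_cons_cons, PySem.List.enumerate_cons]
    by_cases h : d0 = d1
    · rw [List.filter_cons_of_neg (by simp [h]), ih d1 (k + 1)]
      have htb : tb d0 (d1 :: t) = (tb d1 t).map (· + 1) := by simp [tb, h]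
      rw [htb, List.map_map]
      apply List.map_congr_left
      intro j _
      simp only [Function.comp_apply]
      push_cast
      ring
    · rw [List.filter_cons_of_pos (by simp [h]), List.map_cons, ih d1 (k + 1)]
      have hne : d1 ≠ d0 := fun hh => h hh.symm
      have htb : tb d0 (d1 :: t) = 0 :: (tb d1 t).map (· + 1) := by simp [tb, hne]
      rw [htb, List.map_cons, List.map_map]
      refine congrArg₂ List.cons (by simp) ?_
      apply List.map_congr_left
      intro j _
      simp only [Function.comp_apply]
      push_cast
      ring

-- closed form of port A on a list of length ≥ 2
theorem a_char (x y : String) (rest : List String) :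
    create_number_lists (x :: y :: rest) =
      ((tb (pyIntD x) ((y :: rest).map pyIntD)).map
          (fun j => pyIntD x :: ((y :: rest).map pyIntD).take j))
        ++ [pyIntD x :: (y :: rest).map pyIntD] := by
  unfold create_number_lists
  have hlen : ((x :: y :: rest).length == 1) = false := by simp
  rw [hlen]
  have hstep : createLoopA false (x :: y :: rest) [] [] 0
      = createLoopA false (y :: rest) [] [pyIntD x] (pyIntD x) := by
    by_cases h0 : pyIntD x = 0
    · simp [createLoopA, h0]
    · simp [createLoopA, h0]
  rw [hstep, createLoopA_char (y :: rest) [] [pyIntD x] (pyIntD x) (by simp)]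
  simp only [List.nil_append, List.singleton_append]

-- closed form of port B on a list of length ≥ 2
theorem alt_char (x y : String) (rest : List String) :
    create_number_lists_alt (x :: y :: rest) =
      ((tb (pyIntD x) ((y :: rest).map pyIntD)).map
          (fun j => pyIntD x :: ((y :: rest).map pyIntD).take j))
        ++ [pyIntD x :: (y :: rest).map pyIntD] := by
  unfold create_number_lists_alt
  have hlen : ((x :: y :: rest).length == 1) = false := by simp
  rw [hlen]
  simp only [Bool.false_eq_true, if_false, List.map_cons, PySem.List.slice_from_one,
    List.tail_cons]
  rw [cuts_char (pyIntD y :: rest.map pyIntD) (pyIntD x) 0]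
  simp only [List.map_map]
  congr 1
  apply List.map_congr_left
  intro j _
  have hc : ((j : Int) + (0 + 1)) = (((j + 1 : Nat) : Int)) := by push_cast; ring
  rw [Function.comp_apply, hc, PySem.List.slice_to_natCast]
  simp [List.take_succ_cons]

-- ===== VERDICT (by name: the statement is the Claim_ definition above) =====
theorem create_number_lists_spec : Claim_equal_create_number_lists := by
  intro gi _ _
  unfold Spec_create_number_lists
  match gi with
  | [] => rfl
  | [x] => simp [create_number_lists, create_number_lists_alt, createLoopA]
  | x :: y :: rest => rw [a_char, alt_char]
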